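-- pv_equiv track=rewrite | github.com/SpencerHaan/adventofcode-2025 | day_6/main.py | transpose_worksheet
-- ===== SOURCE A (Python) =====
-- def transpose_worksheet(worksheet):
--     columns = dict()
--     for row in worksheet.splitlines():
--         for i, cell in enumerate(reversed(row)):
--             if i not in columns:
--                 columns[i] = []
--             columns[i].append(cell)
--
--     worksheet = ""
--     for i in columns:
--         line = "".join(columns[i])
--         if line.strip() == "":
--             worksheet += "\n"
--             continue
--
--         worksheet += line
--
--         if i != len(columns) - 1:
--             worksheet += "\n"
--
--     return worksheet
-- ===== SOURCE B (Python) =====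
-- def transpose_worksheet(worksheet):
--     rev = [row[::-1] for row in worksheet.splitlines()]
--     m = max((len(r) for r in rev), default=0)
--     parts = []
--     for i in range(m):
--         line = "".join(r[i] for r in rev if i < len(r))
--         parts.append("" if line.strip() == "" else line)
--     out = "\n".join(parts)
--     if parts and parts[-1] == "":
--         out += "\n"
--     return out
-- ===== Notes on version B (the rewrite author's own statement) =====
-- stated objective: simpler
-- what changed: B builds each transposed line directly by indexing column i of the reversed rows and emits the result with a single newline-join over the segments (plus the one trailing newline a blank last column produces), replacing A's per-cell dict scatter and its index-juggling output loop.
import Mathlib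
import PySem

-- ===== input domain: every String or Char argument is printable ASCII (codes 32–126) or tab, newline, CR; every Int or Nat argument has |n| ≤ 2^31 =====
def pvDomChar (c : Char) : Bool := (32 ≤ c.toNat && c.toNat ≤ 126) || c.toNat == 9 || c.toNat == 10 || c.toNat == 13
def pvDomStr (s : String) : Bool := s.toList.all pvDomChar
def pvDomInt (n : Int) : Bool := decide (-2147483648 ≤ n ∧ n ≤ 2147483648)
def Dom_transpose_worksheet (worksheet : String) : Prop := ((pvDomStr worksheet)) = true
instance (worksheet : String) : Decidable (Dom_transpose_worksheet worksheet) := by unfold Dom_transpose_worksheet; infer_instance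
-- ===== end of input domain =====

-- B rebuilds the transposed lines column-by-column with direct indexing and one join,
-- replacing A's per-cell dict scatter and index-juggling output loop (objective: simpler/alternative).

-- ===== PORT A =====
-- one inner-loop step of A: 'if i not in columns: columns[i] = []' then 'columns[i].append(cell)'
def pvStepA (d : PySem.Dict Int (List Char)) (p : Int × Char) : PySem.Dict Int (List Char) :=
  let d' := if d.contains p.1 then d else d.insert p.1 []
  d'.modify p.1 [] (fun l => l ++ [p.2])

def transpose_worksheet (worksheet : String) : String :=
  let columns : PySem.Dict Int (List Char) :=
    (PySem.Chars.splitlines worksheet.toList).foldl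
      (fun d row => (PySem.List.enumerate row.reverse 0).foldl pvStepA d)
      PySem.Dict.empty
  -- the output loop 'for i in columns: …' (strings handled as List Char; result re-wrapped)
  String.ofList <| columns.keys.foldl
    (fun (acc : List Char) i =>
      let line := columns.getD i []              -- "".join(columns[i])
      if PySem.Chars.strip line = [] then acc ++ ['\n']
      else
        let acc' := acc ++ line
        if i ≠ (columns.size : Int) - 1 then acc' ++ ['\n'] else acc')
    []

-- ===== PORT B =====
-- column i of the reversed rows: ''.join(r[i] for r in rev if i < len(r))
def pvCol (rev : List (List Char)) (i : Nat) : List Char :=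
  rev.filterMap (fun r => r[i]?)

def transpose_worksheet_alt (worksheet : String) : String :=
  let rev := (PySem.Chars.splitlines worksheet.toList).map List.reverse
  let m := rev.foldl (fun a r => max a r.length) 0
  let parts := (List.range m).map (fun i =>
    let line := pvCol rev i
    if PySem.Chars.strip line = [] then ([] : List Char) else line)
  let out := PySem.Chars.join ['\n'] parts
  String.ofList (if parts.getLast? = some ([] : List Char) then out ++ ['\n'] else out)

-- ===== PRECONDITION & SPEC =====
def Spec_transpose_worksheet (worksheet : String) (out : String) : Prop := out = transpose_worksheet_alt worksheet
instance (worksheet : String) (out : String) : Decidable (Spec_transpose_worksheet worksheet out) := by unfold Spec_transpose_worksheet; infer_instance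

-- ===== CLAIM (what is proved, stated in full; the proofs are below) =====
def Claim_equal_transpose_worksheet : Prop := ∀ (worksheet : String), Dom_transpose_worksheet worksheet → Spec_transpose_worksheet worksheet (transpose_worksheet worksheet)

-- ===== LEMMAS AND PROOFS =====

-- one step of A's inner loop: value at each key
lemma pvStepA_getD (d : PySem.Dict Int (List Char)) (p : Int × Char) (j : Int) :
    (pvStepA d p).getD j [] =
      if j = p.1 then d.getD p.1 [] ++ [p.2] else d.getD j [] := by
  unfold pvStepA
  by_cases h : d.contains p.1
  · simp [h, PySem.Dict.getD_modify]
  · simp only [Bool.not_eq_true] at h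
    simp [h, PySem.Dict.getD_modify, PySem.Dict.getD_insert,
      PySem.Dict.getD_of_not_contains d ([] : List Char) h]
    by_cases hj : j = p.1 <;> simp [hj]

-- one step of A's inner loop: keys
lemma pvStepA_keys (d : PySem.Dict Int (List Char)) (p : Int × Char) :
    (pvStepA d p).keys = PySem.Set.add d.keys p.1 := by
  unfold pvStepA
  by_cases h : d.contains p.1
  · rw [if_pos h, PySem.Dict.keys_modify, PySem.Dict.keys_insert_of_contains d _ h,
      PySem.Set.add_of_mem ((PySem.Dict.contains_iff_mem_keys d p.1).mp h)]
  · simp only [Bool.not_eq_true] at h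
    rw [if_neg (by simp [h]), PySem.Dict.keys_modify,
      PySem.Dict.keys_insert_of_contains (d.insert p.1 []) _ (PySem.Dict.contains_insert_self d p.1 []),
      PySem.Dict.keys_insert_of_not_contains d [] h,
      PySem.Set.add_of_not_mem (fun hm => by simp [(PySem.Dict.contains_iff_mem_keys d p.1).mpr hm] at h)]

-- A's inner loop over one (reversed) row: values
lemma innerA_getD (xs : List Char) (s : Int) (d : PySem.Dict Int (List Char)) (j : Int) :
    ((PySem.List.enumerate xs s).foldl pvStepA d).getD j [] =
      d.getD j [] ++ (if s ≤ j then (xs[(j - s).toNat]?).toList else []) := by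
  induction xs generalizing s d with
  | nil => simp [PySem.List.enumerate]
  | cons x xs ih =>
    rw [PySem.List.enumerate_cons, List.foldl_cons, ih]
    rw [pvStepA_getD]
    by_cases hj : j = s
    · subst hj
      simp [show ¬ (j + 1 ≤ j) by omega]
    · rw [if_neg hj]
      by_cases h1 : s + 1 ≤ j
      · rw [if_pos h1, if_pos (by omega)]
        have : (j - s).toNat = (j - (s + 1)).toNat + 1 := by omega
        rw [this]
        simp
      · rw [if_neg h1, if_neg (by omega)]

-- A's inner loop over one (reversed) row: keys
lemma innerA_keys (xs : List Char) (s : Int) (d : PySem.Dict Int (List Char)) :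
    ((PySem.List.enumerate xs s).foldl pvStepA d).keys =
      PySem.Set.update d.keys (PySem.List.pyRange s (s + xs.length) 1) := by
  induction xs generalizing s d with
  | nil => simp [PySem.List.enumerate, PySem.List.pyRange_one_eq_nil, PySem.Set.update_nil]
  | cons x xs ih =>
    rw [PySem.List.enumerate_cons, List.foldl_cons, ih, pvStepA_keys]
    have h1 : s + ((x :: xs).length : Int) = (s + 1) + (xs.length : Int) := by
      push_cast [List.length_cons]; ring
    rw [h1,
      show PySem.List.pyRange s ((s + 1) + (xs.length : Int)) 1
          = s :: PySem.List.pyRange (s + 1) ((s + 1) + (xs.length : Int)) 1 from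
        PySem.List.pyRange_one_cons (by omega),
      PySem.Set.update_cons]

-- merging a fresh 0-based range into an existing 0-based range of keys
lemma update_range_range (k n : Nat) :
    PySem.Set.update (PySem.List.pyRange 0 (k : Int) 1) (PySem.List.pyRange 0 (n : Int) 1) =
      PySem.List.pyRange 0 ((max k n : Nat) : Int) 1 := by
  rw [PySem.Set.update_eq_append_filter,
    PySem.Set.ofList_eq_self_of_nodup _ (PySem.List.nodup_pyRange_one 0 (n : Int))]
  by_cases h : n ≤ k
  · rw [List.filter_eq_nil_iff.mpr, List.append_nil]
    · congr 1; omega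
    · intro a ha
      have := PySem.List.mem_pyRange_one.mp ha
      simp [PySem.Set.contains, PySem.List.mem_pyRange_one]
      constructor <;> omega
  · rw [PySem.List.pyRange_one_append 0 (k : Int) (n : Int) (by omega) (by omega),
      List.filter_append]
    rw [List.filter_eq_nil_iff.mpr, List.nil_append, List.filter_eq_self.mpr]
    · rw [← PySem.List.pyRange_one_append 0 (k : Int) (n : Int) (by omega) (by omega)]
      congr 1; omega
    · intro a ha
      have := PySem.List.mem_pyRange_one.mp ha
      simp [PySem.Set.contains, PySem.List.mem_pyRange_one]
      omega
    · intro a ha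
      have := PySem.List.mem_pyRange_one.mp ha
      simp [PySem.Set.contains, PySem.List.mem_pyRange_one]
      omega

-- A's outer loop: values are exactly the columns of the reversed rows
lemma outerA_getD (L : List (List Char)) (d : PySem.Dict Int (List Char)) (j : Int) :
    (L.foldl (fun d r => (PySem.List.enumerate r 0).foldl pvStepA d) d).getD j [] =
      d.getD j [] ++ (if 0 ≤ j then pvCol L j.toNat else []) := by
  induction L generalizing d with
  | nil => simp [pvCol]
  | cons r L ih =>
    rw [List.foldl_cons, ih, innerA_getD]
    by_cases h : 0 ≤ j
    · simp only [if_pos h, List.append_assoc, Int.sub_zero]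
      congr 1
      simp only [pvCol, List.filterMap_cons]
      cases hx : r[j.toNat]? <;> simp_all
    · simp [h]

-- A's outer loop: keys are the range 0 .. (max row length) - 1, in order
lemma outerA_keys (L : List (List Char)) (d : PySem.Dict Int (List Char)) (k : Nat)
    (hk : d.keys = PySem.List.pyRange 0 (k : Int) 1) :
    (L.foldl (fun d r => (PySem.List.enumerate r 0).foldl pvStepA d) d).keys =
      PySem.List.pyRange 0 ((L.foldl (fun a r => max a r.length) k : Nat) : Int) 1 := by
  induction L generalizing d k with
  | nil => simpa using hk
  | cons r L ih =>
    rw [List.foldl_cons, List.foldl_cons]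
    refine ih _ (max k r.length) ?_
    rw [innerA_keys, hk, zero_add, update_range_range]

-- join over a nonempty list, last element split off
lemma join_append_singleton (ps : List (List Char)) (q : List Char) :
    PySem.Chars.join ['\n'] (ps ++ [q]) = ps.flatMap (· ++ ['\n']) ++ q := by
  induction ps with
  | nil => simp [PySem.Chars.join_singleton]
  | cons a ps ih =>
    obtain ⟨b, t, he⟩ : ∃ b t, ps ++ [q] = b :: t := by cases ps <;> exact ⟨_, _, rfl⟩
    rw [List.cons_append, he, PySem.Chars.join_cons_cons, ← he, ih]
    simp

-- the column segment B emits: blank-or-whitespace columns become the empty segment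
def pvPart (L : List (List Char)) (i : Nat) : List Char :=
  if PySem.Chars.strip (pvCol L i) = [] then [] else pvCol L i

-- the whole pipeline, stated over the list of reversed rows
lemma pvMain (L : List (List Char)) :
    (L.foldl (fun d r => (PySem.List.enumerate r 0).foldl pvStepA d) PySem.Dict.empty).keys.foldl
      (fun (acc : List Char) i =>
        let line := (L.foldl (fun d r => (PySem.List.enumerate r 0).foldl pvStepA d) PySem.Dict.empty).getD i []
        if PySem.Chars.strip line = [] then acc ++ ['\n']
        else
          let acc' := acc ++ line
          if i ≠ (((L.foldl (fun d r => (PySem.List.enumerate r 0).foldl pvStepA d) PySem.Dict.empty).size : Int)) - 1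
          then acc' ++ ['\n'] else acc')
      [] =
    (let m := L.foldl (fun a r => max a r.length) 0
     let parts := (List.range m).map (fun i =>
       let line := pvCol L i
       if PySem.Chars.strip line = [] then ([] : List Char) else line)
     let out := PySem.Chars.join ['\n'] parts
     if parts.getLast? = some ([] : List Char) then out ++ ['\n'] else out) := by
  have hkeys := outerA_keys L PySem.Dict.empty 0
    (by rw [PySem.Dict.keys_empty]; exact (PySem.List.pyRange_one_eq_nil (by simp)).symm)
  have hget : ∀ j : Int,
      (L.foldl (fun d r => (PySem.List.enumerate r 0).foldl pvStepA d) PySem.Dict.empty).getD j []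
        = if 0 ≤ j then pvCol L j.toNat else [] := by
    intro j; rw [outerA_getD]; simp
  have hsize :
      (L.foldl (fun d r => (PySem.List.enumerate r 0).foldl pvStepA d) PySem.Dict.empty).size
        = L.foldl (fun a r => max a r.length) 0 := by
    have h2 : (L.foldl (fun d r => (PySem.List.enumerate r 0).foldl pvStepA d) PySem.Dict.empty).size
        = (L.foldl (fun d r => (PySem.List.enumerate r 0).foldl pvStepA d) PySem.Dict.empty).keys.length := by
      simp [PySem.Dict.size, PySem.Dict.keys]
    rw [h2, hkeys, PySem.List.length_pyRange_one]; omega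
  simp only [hget, hsize, hkeys]
  rw [PySem.List.pyRange_zero_nat, List.foldl_map]
  simp only [Int.natCast_nonneg, if_true, Int.toNat_natCast]
  generalize L.foldl (fun a r => max a r.length) 0 = m
  cases m with
  | zero => simp [PySem.Chars.join, List.intercalate]
  | succ n =>
    rw [List.range_succ, List.foldl_append, List.map_append, List.map_singleton,
      List.foldl_cons, List.foldl_nil, join_append_singleton, List.flatMap_map,
      List.getLast?_concat]
    have hchunk : (List.range n).foldl
        (fun (acc : List Char) i =>
          if PySem.Chars.strip (pvCol L i) = [] then acc ++ ['\n']
          else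
            if (i : Int) ≠ ((n + 1 : Nat) : Int) - 1 then (acc ++ pvCol L i) ++ ['\n']
            else acc ++ pvCol L i)
        [] = [] ++ (List.range n).flatMap (fun i => pvPart L i ++ ['\n']) := by
      rw [PySem.List.foldl_congr_mem (List.range n) _
        (fun (acc : List Char) i => acc ++ (pvPart L i ++ ['\n'])) []
        (by
          intro acc i hi
          have hin : i < n := List.mem_range.mp hi
          by_cases hb : PySem.Chars.strip (pvCol L i) = [] <;> simp [pvPart, hb] <;> omega),
        PySem.List.foldl_append_eq_flatMap]
    rw [hchunk]
    simp only [List.nil_append]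
    by_cases hb : PySem.Chars.strip (pvCol L n) = []
    · simp [hb, pvPart]
    · have hne : pvCol L n ≠ [] := by intro h; exact hb (by rw [h]; rfl)
      simp [hb, pvPart, hne]

-- ===== VERDICT (by name: the statement is the Claim_ definition above) =====
theorem transpose_worksheet_spec : Claim_equal_transpose_worksheet := by
  intro worksheet _
  show _ = _
  unfold transpose_worksheet transpose_worksheet_alt
  have h := pvMain ((PySem.Chars.splitlines worksheet.toList).map List.reverse)
  rw [List.foldl_map] at h
  exact congrArg String.ofList h
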